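-- pv_equiv track=rewrite | github.com/Pajdzik/Mishmash | leetcode.com/convert-an-array-into-a-2d-array-with-conditions.py | findMatrix_counter
-- ===== SOURCE A (Python) =====
-- from collections import Counter
--
-- def findMatrix_counter(nums: list[int]) -> list[list[int]]:
--     counter = Counter(nums)
--
--     result = []
--
--     while counter:
--         result.append(list(counter.keys()))
--         to_remove = []
--
--         for k in counter:
--             new_count = counter[k] - 1
--             if new_count:
--                 counter[k] = new_count
--             else:
--                 to_remove.append(k)
--
--         for k in to_remove:
--             del counter[k]
--
--     return result
-- ===== SOURCE B (Python) =====
-- from collections import Counter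
--
-- def findMatrix_counter(nums: list[int]) -> list[list[int]]:
--     counts = Counter(nums)
--     m = max(counts.values(), default=0)
--     return [[k for k, c in counts.items() if c > j] for j in range(m)]
-- ===== Notes on version B (the rewrite author's own statement) =====
-- stated objective: simpler
-- what changed: B counts each value once with Counter, takes the maximum multiplicity m, and builds row j directly as the keys whose count exceeds j, replacing A's repeated scan-decrement-delete passes over a mutating counter.
import Mathlib
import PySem

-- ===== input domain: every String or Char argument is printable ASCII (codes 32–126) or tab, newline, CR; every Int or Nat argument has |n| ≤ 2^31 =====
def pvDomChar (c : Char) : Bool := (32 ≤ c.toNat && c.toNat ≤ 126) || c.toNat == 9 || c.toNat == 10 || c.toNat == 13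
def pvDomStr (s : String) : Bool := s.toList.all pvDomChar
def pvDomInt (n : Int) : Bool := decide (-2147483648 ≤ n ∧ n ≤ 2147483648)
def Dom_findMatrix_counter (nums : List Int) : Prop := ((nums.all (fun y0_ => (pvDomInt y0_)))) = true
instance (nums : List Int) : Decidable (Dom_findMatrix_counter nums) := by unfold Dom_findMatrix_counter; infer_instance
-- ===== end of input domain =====

-- B replaces A's repeated scan-decrement-delete over a mutating counter by a single
-- count-then-distribute construction (row j = keys with count > j); objective: simpler.

-- ===== PORT A =====
-- one body of A's `while` loop: append keys, decrement every count, delete the exhausted keys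
-- (`counter[k]` inside the loop reads k's still-unmodified value, i.e. the value at loop entry)
def aBody (d : PySem.Dict Int Int) (st : PySem.Dict Int Int × List Int) (k : Int) :
    PySem.Dict Int Int × List Int :=
  let nc := d.getD k 0 - 1
  if nc ≠ 0 then (st.1.insert k nc, st.2) else (st.1, st.2 ++ [k])

def aStep (d : PySem.Dict Int Int) : PySem.Dict Int Int :=
  let st := d.keys.foldl (aBody d) (d, [])
  st.2.foldl (fun e k => e.erase k) st.1

-- `while counter:` with fuel; the loop runs max-multiplicity ≤ nums.length times,
-- so the fuel guard only makes the same computation total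
def aLoop : Nat → PySem.Dict Int Int → List (List Int)
  | 0, _ => []
  | f + 1, d => if d.items = [] then [] else d.keys :: aLoop f (aStep d)

def findMatrix_counter (nums : List Int) : List (List Int) :=
  aLoop nums.length (PySem.Dict.counter nums)

-- ===== PORT B =====
def findMatrix_counter_alt (nums : List Int) : List (List Int) :=
  let counts := PySem.Dict.counter nums
  let m := PySem.List.maxD counts.values (fun v => v) 0
  (PySem.List.pyRange 0 m 1).map (fun j =>
    (counts.items.filter (fun kc => decide (j < kc.2))).map (·.1))

-- ===== PRECONDITION & SPEC =====
def Spec_findMatrix_counter (nums : List Int) (out : List (List Int)) : Prop := out = findMatrix_counter_alt nums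
instance (nums : List Int) (out : List (List Int)) : Decidable (Spec_findMatrix_counter nums out) := by unfold Spec_findMatrix_counter; infer_instance

-- ===== CLAIM (what is proved, stated in full; the proofs are below) =====
def Claim_equal_findMatrix_counter : Prop := ∀ (nums : List Int), Dom_findMatrix_counter nums → Spec_findMatrix_counter nums (findMatrix_counter nums)

-- ===== LEMMAS AND PROOFS =====

-- abstract model of one loop body: decrement all counts, drop those that reach 0
def mstep (l : List (Int × Int)) : List (Int × Int) :=
  (l.filter (fun p => decide (p.2 - 1 ≠ 0))).map (fun p => (p.1, p.2 - 1))

def mloop : Nat → List (Int × Int) → List (List Int)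
  | 0, _ => []
  | f + 1, l => if l = [] then [] else l.map (·.1) :: mloop f (mstep l)

def mMax (l : List (Int × Int)) : Int := (l.map (·.2)).foldr max 0

-- phase-1 state decomposition: the to_remove component
theorem phase2_snd (d : PySem.Dict Int Int) (ks : List Int) (e : PySem.Dict Int Int) (r : List Int) :
    (ks.foldl (aBody d) (e, r)).2
    = r ++ ks.filter (fun k => decide (d.getD k 0 - 1 = 0)) := by
  induction ks generalizing e r with
  | nil => simp
  | cons k ks ih =>
    rw [List.foldl_cons, List.filter_cons]
    by_cases h : d.getD k 0 - 1 ≠ 0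
    · have hb : aBody d (e, r) k = (e.insert k (d.getD k 0 - 1), r) := by simp [aBody, h]
      rw [hb, ih]
      simp [h]
    · have h0 : d.getD k 0 - 1 = 0 := by omega
      have hb : aBody d (e, r) k = (e, r ++ [k]) := by simp [aBody, h0]
      rw [hb, ih]
      simp [h0]

-- phase-1 state decomposition: the dict component
theorem phase1_fst (d : PySem.Dict Int Int) (ks : List Int) (e : PySem.Dict Int Int) (r : List Int) :
    (ks.foldl (aBody d) (e, r)).1
    = ks.foldl (fun e k => if d.getD k 0 - 1 ≠ 0 then e.insert k (d.getD k 0 - 1) else e) e := by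
  induction ks generalizing e r with
  | nil => simp
  | cons k ks ih =>
    rw [List.foldl_cons, List.foldl_cons]
    by_cases h : d.getD k 0 - 1 ≠ 0
    · have hb : aBody d (e, r) k = (e.insert k (d.getD k 0 - 1), r) := by simp [aBody, h]
      rw [hb, ih, if_pos h]
    · have h0 : d.getD k 0 - 1 = 0 := by omega
      have hb : aBody d (e, r) k = (e, r ++ [k]) := by simp [aBody, h0]
      rw [hb, ih, if_neg h]

-- the insert loop rewrites values in place
theorem items_foldl_insert (d : PySem.Dict Int Int) (ks : List Int) (e : PySem.Dict Int Int)
    (h : ∀ k ∈ ks, e.contains k = true) :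
    (ks.foldl (fun e k => if d.getD k 0 - 1 ≠ 0 then e.insert k (d.getD k 0 - 1) else e) e).items
    = e.items.map (fun p => if p.1 ∈ ks ∧ d.getD p.1 0 - 1 ≠ 0 then (p.1, d.getD p.1 0 - 1) else p) := by
  induction ks generalizing e with
  | nil => simp
  | cons k ks ih =>
    rw [List.foldl_cons]
    by_cases hc : d.getD k 0 - 1 ≠ 0
    · rw [if_pos hc]
      have hck : e.contains k = true := h k (by simp)
      have hrest : ∀ k' ∈ ks, (e.insert k (d.getD k 0 - 1)).contains k' = true := by
        intro k' hk'
        rw [PySem.Dict.contains_insert]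
        simp [h k' (List.mem_cons_of_mem _ hk')]
      rw [ih _ hrest, PySem.Dict.items_insert_of_contains e (d.getD k 0 - 1) hck, List.map_map]
      apply List.map_congr_left
      intro p _
      simp only [Function.comp_apply]
      by_cases hpk : p.1 = k
      · simp only [hpk, beq_self_eq_true, if_true]
        by_cases hm : k ∈ ks ∧ d.getD k 0 - 1 ≠ 0
        · simp [hm]
        · simp [hc]
      · have : (p.1 == k) = false := by simp [hpk]
        simp only [this, Bool.false_eq_true, if_false]
        by_cases hm : p.1 ∈ ks ∧ d.getD p.1 0 - 1 ≠ 0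
        · simp [hm, List.mem_cons, hpk]
        · have : ¬ (p.1 ∈ k :: ks ∧ d.getD p.1 0 - 1 ≠ 0) := by
            simp only [List.mem_cons]
            tauto
          rw [if_neg hm, if_neg this]
    · rw [if_neg hc]
      have h0 : d.getD k 0 - 1 = 0 := by omega
      rw [ih _ (fun k' hk' => h k' (List.mem_cons_of_mem _ hk'))]
      apply List.map_congr_left
      intro p _
      by_cases hpk : p.1 = k
      · have h1 : ¬ (p.1 ∈ ks ∧ d.getD p.1 0 - 1 ≠ 0) := by
          rw [hpk]; intro hh; exact hh.2 h0
        have h2 : ¬ (p.1 ∈ k :: ks ∧ d.getD p.1 0 - 1 ≠ 0) := by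
          rw [hpk]; intro hh; exact hh.2 h0
        rw [if_neg h1, if_neg h2]
      · by_cases hm : p.1 ∈ ks ∧ d.getD p.1 0 - 1 ≠ 0
        · simp [hm, List.mem_cons, hpk]
        · have : ¬ (p.1 ∈ k :: ks ∧ d.getD p.1 0 - 1 ≠ 0) := by
            simp only [List.mem_cons]
            tauto
          rw [if_neg hm, if_neg this]

-- the erase loop is a filter on items
theorem items_foldl_erase (rem : List Int) (e : PySem.Dict Int Int) :
    (rem.foldl (fun (e : PySem.Dict Int Int) k => e.erase k) e).items
    = e.items.filter (fun p => decide (p.1 ∉ rem)) := by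
  induction rem generalizing e with
  | nil => simp
  | cons k rem ih =>
    rw [List.foldl_cons, ih]
    have herase : (e.erase k).items = e.items.filter (fun p => !(p.1 == k)) := rfl
    rw [herase, List.filter_filter]
    apply List.filter_congr
    intro p _
    by_cases hpk : p.1 = k <;> by_cases hm : p.1 ∈ rem <;> simp [hpk, hm]

-- the mapped-and-filtered items are exactly the model step
theorem combine_lemma (d : PySem.Dict Int Int) (l : List (Int × Int))
    (hmem : ∀ p ∈ l, d.getD p.1 0 = p.2 ∧ p.1 ∈ d.keys) :
    ((l.map (fun p => if p.1 ∈ d.keys ∧ d.getD p.1 0 - 1 ≠ 0 then (p.1, d.getD p.1 0 - 1) else p)).filter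
      (fun p => decide (p.1 ∉ d.keys.filter (fun k => decide (d.getD k 0 - 1 = 0))))) = mstep l := by
  induction l with
  | nil => simp [mstep]
  | cons p t ih =>
    obtain ⟨hg, hk⟩ := hmem p (by simp)
    have iht := ih (fun q hq => hmem q (List.mem_cons_of_mem _ hq))
    by_cases hc : p.2 - 1 ≠ 0
    · have hcond : p.1 ∈ d.keys ∧ d.getD p.1 0 - 1 ≠ 0 := ⟨hk, by rw [hg]; exact hc⟩
      have hnotrem : p.1 ∉ d.keys.filter (fun k => decide (d.getD k 0 - 1 = 0)) := by
        intro hmem'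
        have := (List.mem_filter.mp hmem').2
        rw [hg] at this
        simp at this
        exact hc this
      have hms : mstep (p :: t) = (p.1, p.2 - 1) :: mstep t := by
        simp [mstep, hc]
      rw [List.map_cons, if_pos hcond, List.filter_cons, hg, hms]
      have hdec : (decide ((p.1, p.2 - 1).1 ∉ List.filter (fun k => decide (d.getD k 0 - 1 = 0)) d.keys)) = true := by
        simp only [decide_eq_true_eq]
        exact hnotrem
      rw [hdec, if_pos rfl, iht]
    · have h0 : p.2 - 1 = 0 := by omega
      have hcond : ¬ (p.1 ∈ d.keys ∧ d.getD p.1 0 - 1 ≠ 0) := by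
        intro hh
        rw [hg] at hh
        exact hh.2 h0
      have hrem : p.1 ∈ d.keys.filter (fun k => decide (d.getD k 0 - 1 = 0)) := by
        apply List.mem_filter.mpr
        exact ⟨hk, by rw [hg]; simp [h0]⟩
      have hms : mstep (p :: t) = mstep t := by
        simp [mstep, h0]
      rw [List.map_cons, if_neg hcond, List.filter_cons, hms]
      have hdec : (decide (p.1 ∉ List.filter (fun k => decide (d.getD k 0 - 1 = 0)) d.keys)) = false := by
        simp only [decide_eq_false_iff_not, not_not]
        exact hrem
      rw [hdec]
      simp only [Bool.false_eq_true, if_false]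
      exact iht

theorem aStep_items (d : PySem.Dict Int Int) (hnd : d.keys.Nodup) :
    (aStep d).items = mstep d.items := by
  have hcont : ∀ k ∈ d.keys, d.contains k = true :=
    fun k hk => (PySem.Dict.contains_iff_mem_keys d k).mpr hk
  have hmem : ∀ p ∈ d.items, d.getD p.1 0 = p.2 ∧ p.1 ∈ d.keys := by
    intro p hp
    constructor
    · exact PySem.Dict.getD_of_mem_items d (by exact hp) hnd 0
    · exact PySem.Dict.mem_keys_of_mem_items d hp
  simp only [aStep]
  rw [phase2_snd, phase1_fst, items_foldl_erase, items_foldl_insert d d.keys d hcont,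
    List.nil_append]
  exact combine_lemma d d.items hmem

theorem mstep_keys_sublist (l : List (Int × Int)) :
    ((mstep l).map (·.1)).Sublist (l.map (·.1)) := by
  unfold mstep
  rw [List.map_map]
  exact List.Sublist.map _ List.filter_sublist

theorem aLoop_eq_mloop (f : Nat) (d : PySem.Dict Int Int) (hnd : d.keys.Nodup) :
    aLoop f d = mloop f d.items := by
  induction f generalizing d with
  | zero => rfl
  | succ f ih =>
    simp only [aLoop, mloop]
    by_cases hd : d.items = []
    · simp [hd]
    · rw [if_neg hd, if_neg hd]
      have hnd' : (aStep d).keys.Nodup := by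
        have : (aStep d).keys = (mstep d.items).map (·.1) := by
          show (aStep d).items.map (·.1) = _
          rw [aStep_items d hnd]
        rw [this]
        exact hnd.sublist (mstep_keys_sublist d.items)
      rw [ih (aStep d) hnd', aStep_items d hnd]
      rfl

theorem mMax_nonneg (l : List (Int × Int)) : 0 ≤ mMax l := by
  induction l with
  | nil => simp [mMax]
  | cons p t ih =>
    simp only [mMax, List.map_cons, List.foldr_cons] at *
    omega

theorem mem_le_mMax (l : List (Int × Int)) (p : Int × Int) (hp : p ∈ l) : p.2 ≤ mMax l := by
  induction l with
  | nil => simp at hp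
  | cons q t ih =>
    rcases List.mem_cons.mp hp with h | h
    · simp only [mMax, List.map_cons, List.foldr_cons, h]
      omega
    · have := ih h
      simp only [mMax, List.map_cons, List.foldr_cons] at *
      omega

theorem mMax_mstep (l : List (Int × Int)) (h1 : ∀ p ∈ l, 1 ≤ p.2) :
    mMax (mstep l) = max 0 (mMax l - 1) := by
  induction l with
  | nil => simp [mMax, mstep]
  | cons p t ih =>
    have hp1 : 1 ≤ p.2 := h1 p (by simp)
    have iht := ih (fun q hq => h1 q (List.mem_cons_of_mem _ hq))
    have h0 : 0 ≤ mMax (mstep t) := mMax_nonneg _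
    by_cases hc : p.2 - 1 ≠ 0
    · have hms : mstep (p :: t) = (p.1, p.2 - 1) :: mstep t := by simp [mstep, hc]
      rw [hms]
      simp only [mMax, List.map_cons, List.foldr_cons] at *
      omega
    · have h1' : p.2 - 1 = 0 := by omega
      have hms : mstep (p :: t) = mstep t := by simp [mstep, h1']
      rw [hms]
      simp only [mMax, List.map_cons, List.foldr_cons] at *
      omega

-- one decrement step shifts every row index up by one
theorem row_mstep (l : List (Int × Int)) (h1 : ∀ p ∈ l, 1 ≤ p.2) (j : Nat) :
    ((mstep l).filter (fun p => decide ((j : Int) < p.2))).map (·.1)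
    = (l.filter (fun p => decide (((j + 1 : Nat) : Int) < p.2))).map (·.1) := by
  induction l with
  | nil => simp [mstep]
  | cons p t ih =>
    have hp1 : 1 ≤ p.2 := h1 p (by simp)
    have iht := ih (fun q hq => h1 q (List.mem_cons_of_mem _ hq))
    by_cases hc : p.2 - 1 ≠ 0
    · have hms : mstep (p :: t) = (p.1, p.2 - 1) :: mstep t := by simp [mstep, hc]
      rw [hms]
      by_cases hlt : (j : Int) < p.2 - 1
      · have hlt' : ((j + 1 : Nat) : Int) < p.2 := by push_cast; omega
        rw [List.filter_cons, List.filter_cons]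
        simp only [hlt, hlt', decide_true, if_true, List.map_cons, iht]
      · have hlt' : ¬ ((j + 1 : Nat) : Int) < p.2 := by push_cast at *; omega
        rw [List.filter_cons, List.filter_cons]
        simp only [hlt, hlt', decide_false, Bool.false_eq_true, if_false, iht]
    · have h0 : p.2 - 1 = 0 := by omega
      have hms : mstep (p :: t) = mstep t := by simp [mstep, h0]
      have hlt' : ¬ ((j + 1 : Nat) : Int) < p.2 := by push_cast; omega
      rw [hms, List.filter_cons]
      simp only [hlt', decide_false, Bool.false_eq_true, if_false, iht]

-- the main characterisation of the abstract loop
theorem mloop_eq_rows (f : Nat) (l : List (Int × Int))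
    (h1 : ∀ p ∈ l, 1 ≤ p.2) (hf : ∀ p ∈ l, p.2 ≤ (f : Int)) :
    mloop f l = (List.range (mMax l).toNat).map (fun (j : Nat) =>
      (l.filter (fun p => decide ((j : Int) < p.2))).map (·.1)) := by
  induction f generalizing l with
  | zero =>
    cases l with
    | nil => simp [mloop, mMax]
    | cons p t =>
      have ha := h1 p (by simp)
      have hb := hf p (by simp)
      simp only [Nat.cast_zero] at hb
      omega
  | succ f ih =>
    by_cases hl : l = []
    · subst hl
      simp [mloop, mMax]
    · rw [mloop, if_neg hl]
      have h1' : ∀ p ∈ mstep l, 1 ≤ p.2 := by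
        intro p hp
        simp only [mstep, List.mem_map, List.mem_filter, decide_eq_true_eq] at hp
        obtain ⟨q, ⟨hq, hq0⟩, rfl⟩ := hp
        have := h1 q hq
        omega
      have hf' : ∀ p ∈ mstep l, p.2 ≤ (f : Int) := by
        intro p hp
        simp only [mstep, List.mem_map, List.mem_filter, decide_eq_true_eq] at hp
        obtain ⟨q, ⟨hq, hq0⟩, rfl⟩ := hp
        have := hf q hq
        push_cast at *
        omega
      rw [ih (mstep l) h1' hf', mMax_mstep l h1]
      obtain ⟨p0, hp0⟩ := List.exists_mem_of_ne_nil l hl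
      have hm1 : 1 ≤ mMax l := le_trans (h1 p0 hp0) (mem_le_mMax l p0 hp0)
      have hms : (max 0 (mMax l - 1)).toNat = (mMax l).toNat - 1 := by omega
      have hmt : (mMax l).toNat = ((mMax l).toNat - 1) + 1 := by omega
      rw [hms, hmt, List.range_succ_eq_map, List.map_cons, List.map_map]
      congr 1
      · have : l.filter (fun p => decide (((0 : Nat) : Int) < p.2)) = l := by
          apply List.filter_eq_self.mpr
          intro p hp
          have := h1 p hp
          simp only [Nat.cast_zero, decide_eq_true_eq]
          omega
        rw [this]
      · apply List.map_congr_left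
        intro j _
        simp only [Function.comp_apply, Nat.succ_eq_add_one]
        exact row_mstep l h1 j

theorem max?_cons (t : List Int) (a : Int) (ha : 0 ≤ a) (h : ∀ x ∈ t, 0 ≤ x) :
    PySem.List.max? (a :: t) (fun v => v) = some (max a (t.foldr max 0)) := by
  induction t generalizing a with
  | nil =>
    simp [PySem.List.max?]
    omega
  | cons x t ih =>
    have hx : 0 ≤ x := h x (by simp)
    have hswap : PySem.List.max? (a :: x :: t) (fun v => v)
        = PySem.List.max? (max a x :: t) (fun v => v) := by
      simp only [PySem.List.max?, List.foldl_cons]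
      congr 1
      dsimp only
      split_ifs with hax <;> (congr 1; omega)
    rw [hswap, ih (max a x) (by omega) (fun y hy => h y (List.mem_cons_of_mem _ hy))]
    simp only [List.foldr_cons, Option.some.injEq]
    omega

theorem maxD_eq_foldr (xs : List Int) (h : ∀ x ∈ xs, 0 ≤ x) :
    PySem.List.maxD xs (fun v => v) 0 = xs.foldr max 0 := by
  cases xs with
  | nil => rfl
  | cons x t =>
    have hx : 0 ≤ x := h x (by simp)
    simp only [PySem.List.maxD,
      max?_cons t x hx (fun y hy => h y (List.mem_cons_of_mem _ hy)),
      Option.getD_some, List.foldr_cons]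

-- ===== VERDICT (by name: the statement is the Claim_ definition above) =====
theorem findMatrix_counter_spec : Claim_equal_findMatrix_counter := by
  intro nums _
  unfold Spec_findMatrix_counter
  simp only [findMatrix_counter, findMatrix_counter_alt]
  have hnd := PySem.Dict.nodup_keys_counter nums
  have hvals : ∀ p ∈ (PySem.Dict.counter nums).items,
      p.2 = (nums.count p.1 : Int) ∧ p.1 ∈ nums := by
    intro p hp
    rw [PySem.Dict.items_counter] at hp
    obtain ⟨k, hk, rfl⟩ := List.mem_map.mp hp
    exact ⟨rfl, (PySem.Set.mem_ofList nums k).mp hk⟩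
  have h1 : ∀ p ∈ (PySem.Dict.counter nums).items, 1 ≤ p.2 := by
    intro p hp
    obtain ⟨he, hm⟩ := hvals p hp
    rw [he]
    exact_mod_cast List.count_pos_iff.mpr hm
  have hfl : ∀ p ∈ (PySem.Dict.counter nums).items, p.2 ≤ (nums.length : Int) := by
    intro p hp
    obtain ⟨he, hm⟩ := hvals p hp
    rw [he]
    exact_mod_cast List.count_le_length
  rw [aLoop_eq_mloop nums.length _ hnd,
    mloop_eq_rows nums.length (PySem.Dict.counter nums).items h1 hfl]
  have hv : (PySem.Dict.counter nums).values = (PySem.Dict.counter nums).items.map (·.2) := rfl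
  rw [hv, maxD_eq_foldr _ (by
    intro x hx
    obtain ⟨p, hp, rfl⟩ := List.mem_map.mp hx
    have := h1 p hp
    omega)]
  have hmm : ((PySem.Dict.counter nums).items.map (·.2)).foldr max 0
      = mMax (PySem.Dict.counter nums).items := rfl
  have hrange : PySem.List.pyRange 0 (mMax (PySem.Dict.counter nums).items) 1
      = (List.range (mMax (PySem.Dict.counter nums).items).toNat).map (fun (k : Nat) => (k : Int)) := by
    rw [show mMax (PySem.Dict.counter nums).items
        = ((mMax (PySem.Dict.counter nums).items).toNat : Int)
        from (Int.toNat_of_nonneg (mMax_nonneg _)).symm]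
    exact PySem.List.pyRange_zero_natCast _
  rw [hmm, hrange, List.map_map]
  rfl
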